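-- pv_equiv track=rewrite | github.com/Coni63/CG_repo | training/easy/disordered-first-contact.py | getPieceDecode
-- ===== SOURCE A (Python) =====
-- def getPieceDecode(x, chunk):
--     for idx, l in enumerate(chunk):
--         if (len(chunk)-idx) % 2 == 0:
--             c = x[:l]
--             x = x[l:]
--         else:
--             c = x[-l:]
--             x = x[:-l]
--         yield c
-- ===== SOURCE B (Python) =====
-- def getPieceDecode(x, chunk):
--     # Recursive decomposition: the parity of the REMAINING chunk list decides the
--     # side, so no index arithmetic is needed; recurse on the rest of the string.
--     if chunk:
--         l = chunk[0]
--         if len(chunk) % 2 == 0: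
--             yield x[:l]
--             yield from getPieceDecode(x[l:], chunk[1:])
--         else:
--             yield x[-l:]
--             yield from getPieceDecode(x[:-l], chunk[1:])
-- ===== Notes on version B (the rewrite author's own statement) =====
-- stated objective: simpler
-- what changed: Replaces the enumerate loop with its (len(chunk)-idx)%2 index arithmetic by structural recursion on the chunk list, deciding front/back from the parity of the remaining list's length and recursing on the rest of the string.
import Mathlib
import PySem

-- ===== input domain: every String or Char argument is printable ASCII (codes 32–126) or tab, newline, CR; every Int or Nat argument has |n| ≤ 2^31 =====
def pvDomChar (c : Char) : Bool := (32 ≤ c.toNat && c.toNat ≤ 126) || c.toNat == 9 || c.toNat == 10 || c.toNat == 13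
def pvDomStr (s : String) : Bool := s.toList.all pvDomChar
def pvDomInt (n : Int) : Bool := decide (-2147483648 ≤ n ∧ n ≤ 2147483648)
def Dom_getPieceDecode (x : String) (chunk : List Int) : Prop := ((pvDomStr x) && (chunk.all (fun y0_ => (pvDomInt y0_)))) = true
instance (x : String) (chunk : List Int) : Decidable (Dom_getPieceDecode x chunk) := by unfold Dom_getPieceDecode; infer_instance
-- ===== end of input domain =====

-- B replaces A's enumerate loop and index arithmetic by structural recursion on the chunk
-- list, deciding front/back from the parity of the remaining list's length (objective: simpler).

-- ===== PORT A =====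
-- A loops with enumerate over chunk, taking a prefix (x[:l], x = x[l:]) or a suffix
-- (x[-l:], x = x[:-l]) of the shrinking string by the parity of (len(chunk) - idx).
def getPieceDecode (x : String) (chunk : List Int) : List String :=
  ((PySem.List.enumerate chunk).foldl
    (fun st p =>
      if PySem.Int.mod ((chunk.length : Int) - p.1) 2 == 0 then
        (PySem.Str.slice st.1 (some p.2) none, st.2 ++ [PySem.Str.slice st.1 none (some p.2)])
      else
        (PySem.Str.slice st.1 none (some (-p.2)), st.2 ++ [PySem.Str.slice st.1 (some (-p.2)) none]))
    (x, ([] : List String))).2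

-- ===== PORT B =====
-- B recurses on the chunk list: the parity of the remaining list's length picks the side,
-- the piece is consed on and the recursion continues on the rest of the string.
def getPieceDecode_alt (x : String) (chunk : List Int) : List String :=
  match chunk with
  | [] => []
  | l :: rest =>
    if PySem.Int.mod (((l :: rest).length : Int)) 2 == 0 then
      PySem.Str.slice x none (some l) :: getPieceDecode_alt (PySem.Str.slice x (some l) none) rest
    else
      PySem.Str.slice x (some (-l)) none :: getPieceDecode_alt (PySem.Str.slice x none (some (-l))) rest

-- ===== PRECONDITION & SPEC =====
def Spec_getPieceDecode (x : String) (chunk : List Int) (out : List String) : Prop := out = getPieceDecode_alt x chunk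
instance (x : String) (chunk : List Int) (out : List String) : Decidable (Spec_getPieceDecode x chunk out) := by unfold Spec_getPieceDecode; infer_instance

-- ===== CLAIM (what is proved, stated in full; the proofs are below) =====
def Claim_equal_getPieceDecode : Prop := ∀ (x : String) (chunk : List Int), Dom_getPieceDecode x chunk → Spec_getPieceDecode x chunk (getPieceDecode x chunk)

-- ===== LEMMAS AND PROOFS =====

-- A's loop body as a named step function (definitionally the lambda in the port; n = len(chunk)).
def pvStepA (n : Int) (st : String × List String) (p : Int × Int) : String × List String :=
  if PySem.Int.mod (n - p.1) 2 == 0 then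
    (PySem.Str.slice st.1 (some p.2) none, st.2 ++ [PySem.Str.slice st.1 none (some p.2)])
  else
    (PySem.Str.slice st.1 none (some (-p.2)), st.2 ++ [PySem.Str.slice st.1 (some (-p.2)) none])

lemma pvA_eq (x : String) (chunk : List Int) :
    getPieceDecode x chunk
      = ((PySem.List.enumerate chunk).foldl (pvStepA (chunk.length : Int)) (x, [])).2 := rfl

-- Loop ↔ recursion: starting A's fold at index i with i + len(rest) = n, the accumulated
-- output is the accumulator followed by B's recursive result on the same string.
lemma pvFoldEq (n : Int) (rest : List Int) :
    ∀ (i : Int) (x : String) (acc : List String), i + (rest.length : Int) = n →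
      ((PySem.List.enumerate rest i).foldl (pvStepA n) (x, acc)).2
        = acc ++ getPieceDecode_alt x rest := by
  induction rest with
  | nil => intro i x acc _; simp [PySem.List.enumerate, getPieceDecode_alt]
  | cons l rest ih =>
    intro i x acc hn
    have hlen : n - i = ((l :: rest).length : Int) := by
      simp only [List.length_cons] at hn ⊢; push_cast at hn ⊢; omega
    rw [PySem.List.enumerate_cons]
    simp only [List.foldl_cons, pvStepA, hlen]
    unfold getPieceDecode_alt
    by_cases hif : (PySem.Int.mod (((l :: rest).length : Int)) 2 == 0) = true
    · simp only [hif, if_true]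
      rw [ih (i + 1) _ _ (by simp only [List.length_cons] at hn ⊢; push_cast at hn ⊢; omega)]
      simp
    · simp only [hif]
      rw [ih (i + 1) _ _ (by simp only [List.length_cons] at hn ⊢; push_cast at hn ⊢; omega)]
      simp

-- ===== VERDICT (by name: the statement is the Claim_ definition above) =====
theorem getPieceDecode_spec : Claim_equal_getPieceDecode := by
  intro x chunk _
  unfold Spec_getPieceDecode
  rw [pvA_eq, pvFoldEq (chunk.length : Int) chunk 0 x [] (by simp)]
  simp
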